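-- pv_equiv track=rewrite | github.com/exhuma/config_resolver | config_resolver/core.py | build_call_str
-- ===== SOURCE A (Python) =====
-- def build_call_str(prefix, args, kwargs):
--     # type: (str, Any, Any) -> str
--     '''
--     Build a callable Python string for a function call. The output will be
--     combined similar to this template::
--
--         <prefix>(<args>, <kwargs>)
--
--     Example::
--
--         >>> build_call_str('foo', (1, 2), {'a': '10'})
--         "foo(1, 2, a='10')"
--     '''
--     kwargs_str = ', '.join(['%s=%r' % (key, value) for key, value in
--                             kwargs.items()])
--     args_str = ', '.join([repr(arg) for arg in args])
--     output = [prefix, '(']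
--     if args:
--         output.append(args_str)
--     if args and kwargs:
--         output.append(', ')
--     if kwargs:
--         output.append(kwargs_str)
--     output.append(')')
--     return ''.join(output)
-- ===== SOURCE B (Python) =====
-- def build_call_str(prefix, args, kwargs):
--     out = prefix + '('
--     first = True
--     for a in args:
--         if not first:
--             out += ', '
--         out += repr(a)
--         first = False
--     for k, v in kwargs.items():
--         if not first:
--             out += ', '
--         out += '%s=%r' % (k, v)
--         first = False
--     return out + ')'
-- ===== Notes on version B (the rewrite author's own statement) =====
-- stated objective: alternative
-- what changed: Replaces A's staged rendering (two separately joined strings plus three conditional comma branches assembled in a fragment list) by a single accumulator pass over args then kwargs that emits each separator inline via a first-element flag, with no join and no intermediate lists.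
import Mathlib
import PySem

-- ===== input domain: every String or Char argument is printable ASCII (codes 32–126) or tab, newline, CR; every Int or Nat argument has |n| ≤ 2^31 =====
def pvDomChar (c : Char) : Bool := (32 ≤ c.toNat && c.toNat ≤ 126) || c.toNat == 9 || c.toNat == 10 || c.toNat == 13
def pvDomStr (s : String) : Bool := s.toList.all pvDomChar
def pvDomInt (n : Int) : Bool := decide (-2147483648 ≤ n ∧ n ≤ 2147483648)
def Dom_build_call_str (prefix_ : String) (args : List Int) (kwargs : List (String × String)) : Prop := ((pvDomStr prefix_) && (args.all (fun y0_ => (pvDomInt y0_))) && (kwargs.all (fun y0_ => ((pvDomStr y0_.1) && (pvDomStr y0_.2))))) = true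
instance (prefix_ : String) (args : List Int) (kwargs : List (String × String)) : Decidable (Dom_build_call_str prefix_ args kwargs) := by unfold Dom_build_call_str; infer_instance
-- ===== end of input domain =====

-- B replaces A's staged rendering (two joined strings + three conditional comma branches)
-- by one accumulator pass over args then kwargs with a first-element flag (objective: alternative).

-- ===== PORT A =====
-- shared helper: Python repr() of a str (exact on the printable-ASCII + tab/newline/CR domain):
-- quote is '\'' unless the string contains '\'' and no '"'; backslash, the quote char and
-- tab/newline/CR are escaped, all other domain characters are kept verbatim.
def pyReprEsc (q : Char) (c : Char) : List Char :=
  if c = '\\' then ['\\', '\\']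
  else if c = q then ['\\', q]
  else if c = Char.ofNat 9 then ['\\', 't']
  else if c = Char.ofNat 10 then ['\\', 'n']
  else if c = Char.ofNat 13 then ['\\', 'r']
  else [c]

def pyReprStr (s : String) : String :=
  let cs := s.toList
  let q : Char := if '\'' ∈ cs ∧ ¬ '"' ∈ cs then '"' else '\''
  String.ofList ([q] ++ cs.flatMap (pyReprEsc q) ++ [q])

def build_call_str (prefix_ : String) (args : List Int) (kwargs : List (String × String)) : String :=
  let kwargs_str := PySem.Str.join ", " (kwargs.map (fun kv => kv.1 ++ "=" ++ pyReprStr kv.2))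
  let args_str := PySem.Str.join ", " (args.map (fun a => PySem.Int.toStr a))
  let output := [prefix_, "("]
  let output := if args = [] then output else output ++ [args_str]
  let output := if args ≠ [] ∧ kwargs ≠ [] then output ++ [", "] else output
  let output := if kwargs = [] then output else output ++ [kwargs_str]
  PySem.Str.join "" (output ++ [")"])

-- ===== PORT B =====
-- single pass: string accumulator `out`, flag `first`; separator emitted inline before
-- every fragment except the first (mirrors Source B's two loops; no join, no fragment lists).
def build_call_str_alt (prefix_ : String) (args : List Int) (kwargs : List (String × String)) : String :=
  let st0 : String × Bool := (prefix_ ++ "(", true)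
  let st1 := args.foldl
    (fun st a => ((if st.2 then st.1 else st.1 ++ ", ") ++ PySem.Int.toStr a, false)) st0
  let st2 := kwargs.foldl
    (fun st kv => ((if st.2 then st.1 else st.1 ++ ", ") ++ (kv.1 ++ "=" ++ pyReprStr kv.2), false)) st1
  st2.1 ++ ")"

-- ===== PRECONDITION & SPEC =====
def Spec_build_call_str (prefix_ : String) (args : List Int) (kwargs : List (String × String)) (out : String) : Prop := out = build_call_str_alt prefix_ args kwargs
instance (prefix_ : String) (args : List Int) (kwargs : List (String × String)) (out : String) : Decidable (Spec_build_call_str prefix_ args kwargs out) := by unfold Spec_build_call_str; infer_instance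

-- ===== CLAIM (what is proved, stated in full; the proofs are below) =====
def Claim_equal_build_call_str : Prop := ∀ (prefix_ : String) (args : List Int) (kwargs : List (String × String)), Dom_build_call_str prefix_ args kwargs → Spec_build_call_str prefix_ args kwargs (build_call_str prefix_ args kwargs)

-- ===== LEMMAS AND PROOFS =====

-- a sep-flag fold started in the "not first" state just appends ", " ++ fragment for each element
theorem fold_sep_false {α : Type} (f : α → String) (xs : List α) (acc : String) :
    xs.foldl (fun (st : String × Bool) x => ((if st.2 then st.1 else st.1 ++ ", ") ++ f x, false)) (acc, false)
      = (xs.foldl (fun s x => s ++ ", " ++ f x) acc, false) := by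
  induction xs generalizing acc with
  | nil => rfl
  | cons x xs ih => simpa using ih (acc ++ ", " ++ f x)

theorem toList_foldl_sep {α : Type} (f : α → String) (xs : List α) (acc : String) :
    (xs.foldl (fun s x => s ++ ", " ++ f x) acc).toList
      = acc.toList ++ xs.flatMap (fun x => [',', ' '] ++ (f x).toList) := by
  induction xs generalizing acc with
  | nil => simp
  | cons x xs ih => simp [ih, String.toList_append]

-- join with separator ", " over a nonempty fragment list, in flatMap form
theorem chars_join_cons (fs : List (List Char)) (a : List Char) :
    PySem.Chars.join [',', ' '] (a :: fs) = a ++ fs.flatMap (fun t => [',', ' '] ++ t) := by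
  induction fs generalizing a with
  | nil => simp [PySem.Chars.join_singleton]
  | cons b fs ih => simp [PySem.Chars.join_cons_cons, ih, List.append_assoc]

theorem str_eq_of_toList {s t : String} (h : s.toList = t.toList) : s = t := by
  have := congrArg String.ofList h
  simpa using this

-- B's result, in closed form over List Char
theorem alt_toList (prefix_ : String) (args : List Int) (kwargs : List (String × String)) :
    (build_call_str_alt prefix_ args kwargs).toList
      = prefix_.toList ++ ['('] ++
        PySem.Chars.join [',', ' ']
          ((args.map (fun a => (PySem.Int.toStr a).toList))
            ++ kwargs.map (fun kv => (kv.1 ++ "=" ++ pyReprStr kv.2).toList)) ++ [')'] := by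
  unfold build_call_str_alt
  rcases args with _ | ⟨a, args'⟩
  · rcases kwargs with _ | ⟨kv, kwargs'⟩
    · simp [PySem.Chars.join_nil, String.toList_append]
    · simp only [List.map_nil, List.nil_append, List.foldl_nil, List.foldl_cons, if_pos, List.map_cons]
      rw [fold_sep_false, chars_join_cons]
      simp [toList_foldl_sep, String.toList_append, List.append_assoc, List.flatMap_map]
  · simp only [List.foldl_cons, List.map_cons, List.cons_append]
    rw [fold_sep_false]
    rcases kwargs with _ | ⟨kv, kwargs'⟩
    · simp only [List.map_nil, List.append_nil, List.foldl_nil]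
      rw [chars_join_cons]
      simp [toList_foldl_sep, String.toList_append, List.append_assoc, List.flatMap_map]
    · simp only [List.foldl_cons]
      rw [fold_sep_false, chars_join_cons]
      simp [toList_foldl_sep, String.toList_append, List.append_assoc, List.flatMap_map]

-- one join over the concatenated fragment lists = the two joins with the separator in between
theorem chars_join_append (sep : List Char) (xs ys : List (List Char)) (hx : xs ≠ []) (hy : ys ≠ []) :
    PySem.Chars.join sep (xs ++ ys) = PySem.Chars.join sep xs ++ sep ++ PySem.Chars.join sep ys := by
  induction xs with
  | nil => exact absurd rfl hx
  | cons a xs ih =>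
    cases xs with
    | nil =>
      cases ys with
      | nil => exact absurd rfl hy
      | cons b ys =>
        simp [PySem.Chars.join_singleton, PySem.Chars.join_cons_cons]
    | cons a' xs' =>
      have h := ih (by simp)
      simp only [List.cons_append] at h ⊢
      rw [PySem.Chars.join_cons_cons, PySem.Chars.join_cons_cons, h]
      simp [List.append_assoc]

theorem build_call_str_spec : Claim_equal_build_call_str := by
  intro prefix_ args kwargs _
  unfold Spec_build_call_str build_call_str
  apply str_eq_of_toList
  rw [alt_toList]
  rcases ha : args with _ | ⟨a, args'⟩ <;> rcases hk : kwargs with _ | ⟨kv, kwargs'⟩ <;>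
    simp only [ne_eq, not_true_eq_false, not_false_iff, and_true, and_false, if_true,
      if_false, reduceCtorEq, List.map_cons, List.map_nil] <;>
    simp only [PySem.Str.toList_join, List.map_append, List.map_cons, List.map_nil,
      String.toList_append] <;>
    simp [PySem.Chars.join_nil, PySem.Chars.join_singleton, PySem.Chars.join_cons_cons,
      Function.comp_def, String.toList_append]
  -- remaining: both nonempty
  conv_rhs => rw [← List.cons_append, chars_join_append [',', ' '] _ _ (by simp) (by simp)]
  simp [List.append_assoc]
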